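-- pv_equiv track=rewrite | github.com/MarcoDSilva/MIT6001x-Introduction-to-Computer-Science-and-Programming-in-Python | midterm/problem5.py | uniqueValues
-- ===== SOURCE A (Python) =====
-- def uniqueValues(aDict):
--     '''
--     aDict: a dictionary
--     '''
--     d = {}
--     l = []
--
--     # for each key in the dictionary we check if the respective value exists in
--     # the dictionary, if it does we update, otherwise we add a new one
--     for k in aDict:
--         val = aDict[k]
--
--         if val in d:
--             d[val] += 1
--         else:
--             d[val] = 1
--
--     # for each value in the new dict, if it only has showed one time
--     # we get the key from aDict and add it to the list to return
--     for v in d: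
--         if d[v] == 1:
--             l.append(getIndex(aDict,v))
--
--     # sorting because we need to return in order
--     l.sort()
--     return l
--
-- def getIndex(aDict, val):
--     '''
--     Receives a dictionary and a value to search
--     If any key corresponds to that value, that key is returned
--     '''
--
--     for k in aDict:
--         if aDict[k] == val:
--             return k
--
--     return None
-- ===== SOURCE B (Python) =====
-- def uniqueValues(aDict):
--     '''
--     aDict: a dictionary
--     '''
--     vals = list(aDict.values())
--     return sorted(k for k, v in aDict.items() if vals.count(v) == 1)
-- ===== Notes on version B (the rewrite author's own statement) =====
-- stated objective: simpler
-- what changed: Drops A's frequency-table-then-rescan-for-the-key strategy: B filters the items directly, keeping each key whose value occurs exactly once in the values list, and sorts the kept keys.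
import Mathlib
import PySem

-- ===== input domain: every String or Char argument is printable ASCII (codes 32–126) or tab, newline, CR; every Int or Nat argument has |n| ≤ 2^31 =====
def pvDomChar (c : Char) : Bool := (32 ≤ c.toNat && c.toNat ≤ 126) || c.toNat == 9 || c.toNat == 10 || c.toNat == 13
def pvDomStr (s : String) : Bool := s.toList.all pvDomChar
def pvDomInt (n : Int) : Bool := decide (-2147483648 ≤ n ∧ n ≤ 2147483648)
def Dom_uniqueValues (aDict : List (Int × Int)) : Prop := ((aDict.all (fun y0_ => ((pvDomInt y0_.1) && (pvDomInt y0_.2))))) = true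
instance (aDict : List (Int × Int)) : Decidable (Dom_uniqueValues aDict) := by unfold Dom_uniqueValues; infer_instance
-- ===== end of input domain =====

-- B drops A's frequency table + getIndex rescan: it filters the dict's items directly by
-- "value occurs exactly once among the values" and sorts the kept keys (objective: simpler).


-- ===== PORT A =====
-- helper getIndex: 'for k in aDict: if aDict[k] == val: return k' / 'return None'
def getIndexGo (d : PySem.Dict Int Int) : List Int → Int → Option Int
  | [], _ => none
  | k :: ks, val => if d.getD k 0 == val then some k else getIndexGo d ks val

def getIndex (aDict : List (Int × Int)) (val : Int) : Option Int :=
  getIndexGo (PySem.Dict.mk aDict) (PySem.Dict.mk aDict).keys val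

def uniqueValues (aDict : List (Int × Int)) : List Int :=
  let ad := PySem.Dict.mk aDict
  -- first loop: 'for k in aDict: val = aDict[k]; if val in d: d[val] += 1 else: d[val] = 1'
  -- (k is drawn from aDict's keys, so aDict[k] never raises; getD's default 0 is unreachable)
  let d := ad.keys.foldl (fun d k =>
      let val := ad.getD k 0
      if d.contains val then d.modify val 0 (· + 1) else d.insert val 1)
    (PySem.Dict.empty : PySem.Dict Int Int)
  -- second loop: 'for v in d: if d[v] == 1: l.append(getIndex(aDict, v))'
  -- (v is one of aDict's values, so getIndex never returns None here; .getD 0 is unreachable)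
  let l := d.keys.foldl (fun l v =>
      if d.getD v 0 == 1 then l ++ [(getIndex aDict v).getD 0] else l) ([] : List Int)
  -- 'l.sort(); return l'
  PySem.List.sorted l (fun x => x) false

-- ===== PORT B =====
def uniqueValues_alt (aDict : List (Int × Int)) : List Int :=
  -- vals = list(aDict.values())
  let vals := (PySem.Dict.mk aDict).values
  -- sorted(k for k, v in aDict.items() if vals.count(v) == 1)
  PySem.List.sorted
    (((PySem.Dict.mk aDict).items.filter (fun kv => PySem.List.count vals kv.2 == 1)).map Prod.fst)
    (fun x => x) false

-- ===== PRECONDITION & SPEC =====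
-- Pre_ excludes association lists with duplicate keys: those are not a faithful insertion-order
-- representation of a Python dict (dict construction collapses them), so neither port models them.
def Pre_uniqueValues (aDict : List (Int × Int)) : Prop := (aDict.map Prod.fst).Nodup
instance (aDict : List (Int × Int)) : Decidable (Pre_uniqueValues aDict) := by unfold Pre_uniqueValues; infer_instance
def pvWitness_uniqueValues : (List (Int × Int)) := [(1, 5), (2, 5), (3, 7)]

def Spec_uniqueValues (aDict : List (Int × Int)) (out : List Int) : Prop := out = uniqueValues_alt aDict
instance (aDict : List (Int × Int)) (out : List Int) : Decidable (Spec_uniqueValues aDict out) := by unfold Spec_uniqueValues; infer_instance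

-- ===== CLAIM (what is proved, stated in full; the proofs are below) =====
def Claim_equal_uniqueValues : Prop := ∀ (aDict : List (Int × Int)), Dom_uniqueValues aDict → Pre_uniqueValues aDict → Spec_uniqueValues aDict (uniqueValues aDict)

-- ===== LEMMAS AND PROOFS =====

-- a key absent from a dict looks up to none
theorem get?_eq_none_of_not_contains (d : PySem.Dict Int Int) (k : Int)
    (h : d.contains k = false) : d.get? k = none := by
  simp only [PySem.Dict.contains, List.any_eq_false] at h
  simp only [PySem.Dict.get?, Option.map_eq_none_iff, List.find?_eq_none]
  exact h

-- A's first loop equals the plain counter fold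
theorem loopA_eq_counter (l : List Int) (d : PySem.Dict Int Int) :
    l.foldl (fun d x => if d.contains x then d.modify x 0 (· + 1) else d.insert x 1) d
      = l.foldl (fun d x => d.modify x 0 (· + 1)) d := by
  apply PySem.List.foldl_congr_mem
  intro acc x _
  by_cases h : acc.contains x
  · simp [h]
  · simp only [Bool.not_eq_true] at h
    simp [h, PySem.Dict.modify, PySem.Dict.getD, get?_eq_none_of_not_contains acc x h]

-- folding a value-consuming body over the keys (looked up in the dict) is folding over the values
theorem foldl_keys_getD {β : Type} (aDict : List (Int × Int)) (hnd : (aDict.map Prod.fst).Nodup)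
    (g : β → Int → β) (init : β) :
    (aDict.map Prod.fst).foldl (fun b k => g b ((PySem.Dict.mk aDict).getD k 0)) init
      = aDict.foldl (fun b kv => g b kv.2) init := by
  induction aDict generalizing init with
  | nil => rfl
  | cons kv rest ih =>
    obtain ⟨k, v⟩ := kv
    simp only [List.map_cons, List.nodup_cons] at hnd
    simp only [List.map_cons, List.foldl_cons]
    have h1 : (PySem.Dict.mk ((k, v) :: rest)).getD k 0 = v := by
      simp [PySem.Dict.getD, PySem.Dict.get?_mk_cons]
    rw [h1]
    rw [PySem.List.foldl_congr_mem (rest.map Prod.fst) _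
        (fun b k' => g b ((PySem.Dict.mk rest).getD k' 0)) _ ?_]
    · exact ih hnd.2 (g init v)
    · intro acc x hx
      have hne : (k == x) = false := by
        simp only [beq_eq_false_iff_ne, ne_eq]
        rintro rfl
        exact hnd.1 hx
      simp [PySem.Dict.getD, PySem.Dict.get?_mk_cons, hne]

-- getIndexGo only depends on the looked-up values
theorem getIndexGo_congr (d d' : PySem.Dict Int Int) (ks : List Int) (val : Int)
    (h : ∀ x ∈ ks, d.getD x 0 = d'.getD x 0) :
    getIndexGo d ks val = getIndexGo d' ks val := by
  induction ks with
  | nil => rfl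
  | cons k ks ih =>
    simp only [getIndexGo, h k (by simp)]
    rw [ih (fun x hx => h x (by simp [hx]))]

theorem getIndex_cons (k v : Int) (rest : List (Int × Int)) (val : Int)
    (h : k ∉ rest.map Prod.fst) :
    getIndex ((k, v) :: rest) val = if v == val then some k else getIndex rest val := by
  unfold getIndex
  have hkeys : (PySem.Dict.mk ((k, v) :: rest)).keys = k :: rest.map Prod.fst := by
    simp [PySem.Dict.keys_mk]
  have hkeys' : (PySem.Dict.mk rest).keys = rest.map Prod.fst := by
    simp [PySem.Dict.keys_mk]
  rw [hkeys, hkeys']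
  have h1 : (PySem.Dict.mk ((k, v) :: rest)).getD k 0 = v := by
    simp [PySem.Dict.getD, PySem.Dict.get?_mk_cons]
  simp only [getIndexGo, h1]
  rw [getIndexGo_congr (PySem.Dict.mk ((k, v) :: rest)) (PySem.Dict.mk rest) _ val ?_]
  intro x hx
  have hne : (k == x) = false := by
    simp only [beq_eq_false_iff_ne, ne_eq]
    rintro rfl
    exact h hx
  simp [PySem.Dict.getD, PySem.Dict.get?_mk_cons, hne]

-- on a value occurring exactly once, getIndex returns its (unique) key
theorem getIndex_of_count_one (aDict : List (Int × Int)) (hnd : (aDict.map Prod.fst).Nodup)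
    (k v : Int) (hmem : (k, v) ∈ aDict) (h1 : (aDict.map Prod.snd).count v = 1) :
    getIndex aDict v = some k := by
  induction aDict with
  | nil => simp at hmem
  | cons kv rest ih =>
    obtain ⟨k', v'⟩ := kv
    simp only [List.map_cons, List.nodup_cons] at hnd
    rw [getIndex_cons k' v' rest v hnd.1]
    rcases List.mem_cons.mp hmem with h | h
    · obtain ⟨rfl, rfl⟩ := Prod.mk.injEq .. ▸ h
      · simp
    · have hv : v ∈ rest.map Prod.snd := List.mem_map.mpr ⟨(k, v), h, rfl⟩
      have hne : v' ≠ v := by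
        rintro rfl
        simp only [List.map_cons, List.count_cons_self] at h1
        have : (rest.map Prod.snd).count v' = 0 := by omega
        exact (List.count_eq_zero.mp this) hv
      have hne' : (v' == v) = false := by simp [hne]
      rw [hne']
      simp only [Bool.false_eq_true, if_false]
      simp only [List.map_cons] at h1
      rw [List.count_cons_of_ne hne] at h1
      exact ih hnd.2 h h1

-- filtering set(vs) by a predicate only true of elements occurring at most once = filtering vs
theorem foldl_add_filter (q : Int → Bool) (vs : List Int)
    (hq : ∀ x, q x = true → vs.count x ≤ 1) :
    ∀ s : List Int, (∀ x ∈ s, q x = true → x ∉ vs) →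
      (vs.foldl PySem.Set.add s).filter q = s.filter q ++ vs.filter q := by
  induction vs with
  | nil => simp
  | cons v rest ih =>
    intro s hs
    simp only [List.foldl_cons]
    by_cases hc : PySem.Set.contains s v
    · have hadd : PySem.Set.add s v = s := by simp only [PySem.Set.add, hc, if_true]
      rw [hadd]
      have hqv : q v = false := by
        by_contra hqv
        simp only [Bool.not_eq_false] at hqv
        exact hs v ((PySem.Set.contains_iff s v).mp hc) hqv (List.mem_cons_self)
      rw [ih (fun x hx => Nat.le_trans (List.count_le_count_cons ..) (hq x hx)) s
          (fun x hxs hqx => fun hxr => hs x hxs hqx (List.mem_cons_of_mem v hxr))]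
      simp [hqv]
    · have hadd : PySem.Set.add s v = s ++ [v] := by
        simp only [Bool.not_eq_true] at hc
        simp only [PySem.Set.add, hc, Bool.false_eq_true, if_false]
      rw [hadd]
      rw [ih (fun x hx => Nat.le_trans (List.count_le_count_cons ..) (hq x hx)) (s ++ [v]) ?_]
      · simp only [List.filter_append, List.filter_cons]
        cases hqv : q v <;> simp
      · intro x hxs hqx hxr
        rcases List.mem_append.mp hxs with h | h
        · exact hs x h hqx (List.mem_cons_of_mem v hxr)
        · simp only [List.mem_singleton] at h
          subst h
          have := hq x hqx
          simp only [List.count_cons_self] at this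
          have : rest.count x = 0 := by omega
          exact (List.count_eq_zero.mp this) hxr

theorem ofList_filter (q : Int → Bool) (vs : List Int)
    (hq : ∀ x, q x = true → vs.count x ≤ 1) :
    (PySem.Set.ofList vs).filter q = vs.filter q := by
  have := foldl_add_filter q vs hq [] (by simp)
  simpa [PySem.Set.ofList, PySem.Set.empty] using this

-- Int/Nat beq-with-1 bridge for the counter's Int-valued counts
theorem castbeq (n : Nat) : ((n : Int) == (1 : Int)) = (n == 1) := by
  rcases eq_or_ne n 1 with h | h <;> simp [h]

-- A's first loop, written without the surrounding lets (defeq to the port's)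
def dA (aDict : List (Int × Int)) : PySem.Dict Int Int :=
  (PySem.Dict.mk aDict).keys.foldl (fun d k =>
    let val := (PySem.Dict.mk aDict).getD k 0
    if d.contains val then d.modify val 0 (· + 1) else d.insert val 1)
    (PySem.Dict.empty : PySem.Dict Int Int)

-- A's second loop applied to a dict d
def fA (aDict : List (Int × Int)) (d : PySem.Dict Int Int) : List Int :=
  d.keys.foldl (fun l v => if d.getD v 0 == 1 then l ++ [(getIndex aDict v).getD 0] else l) []

theorem dA_eq_counter (aDict : List (Int × Int)) (hnd : (aDict.map Prod.fst).Nodup) :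
    dA aDict = PySem.Dict.counter (aDict.map Prod.snd) := by
  have h1 := foldl_keys_getD aDict hnd
    (fun (d : PySem.Dict Int Int) (val : Int) =>
      if d.contains val then d.modify val 0 (· + 1) else d.insert val 1)
    (PySem.Dict.empty : PySem.Dict Int Int)
  have h2 := List.foldl_map (f := Prod.snd)
    (g := fun (d : PySem.Dict Int Int) (x : Int) =>
      if d.contains x then d.modify x 0 (· + 1) else d.insert x 1)
    (l := aDict) (init := (PySem.Dict.empty : PySem.Dict Int Int))
  have h3 := loopA_eq_counter (aDict.map Prod.snd) (PySem.Dict.empty : PySem.Dict Int Int)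
  exact h1.trans (h2.symm.trans (h3.trans rfl))

theorem lA_eq (aDict : List (Int × Int)) (hnd : (aDict.map Prod.fst).Nodup) :
    fA aDict (dA aDict)
      = (aDict.filter
          (fun kv => PySem.List.count (aDict.map Prod.snd) kv.2 == 1)).map Prod.fst := by
  rw [congrArg (fA aDict) (dA_eq_counter aDict hnd)]
  unfold fA
  rw [PySem.Dict.keys_counter]
  rw [PySem.List.foldl_congr_mem (PySem.Set.ofList (aDict.map Prod.snd)) _
      (fun l v => if PySem.List.count (aDict.map Prod.snd) v == 1 then
          l ++ [(getIndex aDict v).getD 0] else l)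
      _ (by
        intro acc v _
        rw [PySem.Dict.getD_counter, castbeq, ← PySem.List.count_eq])]
  rw [PySem.List.foldl_append_if
      (fun v => PySem.List.count (aDict.map Prod.snd) v == 1)
      (fun v => (getIndex aDict v).getD 0)
      (PySem.Set.ofList (aDict.map Prod.snd)) []]
  rw [List.nil_append]
  rw [ofList_filter (fun v => PySem.List.count (aDict.map Prod.snd) v == 1) (aDict.map Prod.snd)
      (fun x hx => Nat.le_of_eq (by simpa [PySem.List.count_eq] using hx))]
  rw [List.filter_map, List.map_map]
  exact List.map_congr_left (fun kv hkv => by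
    rw [List.mem_filter] at hkv
    have h1 : (aDict.map Prod.snd).count kv.2 = 1 := by
      simpa [PySem.List.count_eq] using hkv.2
    have hg := getIndex_of_count_one aDict hnd kv.1 kv.2 (by simpa using hkv.1) h1
    simp [Function.comp, hg])

-- ===== VERDICT (by name: the statement is the Claim_ definition above) =====
theorem uniqueValues_spec : Claim_equal_uniqueValues := by
  intro aDict _ hnd
  unfold Spec_uniqueValues
  show PySem.List.sorted (fA aDict (dA aDict)) (fun x => x) false
      = PySem.List.sorted
          ((aDict.filter
            (fun kv => PySem.List.count (aDict.map Prod.snd) kv.2 == 1)).map Prod.fst)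
          (fun x => x) false
  rw [lA_eq aDict hnd]
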